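-- pv_equiv track=rewrite | github.com/Vignesh-1101/DSA-PYTHON | Python/sum_of_numbers.py | maxPartition
-- ===== SOURCE A (Python) =====
-- def maxPartition(n, arr):
--         #Write your code here
--       max_so_far = 0
--       partions = 0
--       for i in range(n):
--         max_so_far = max(max_so_far, arr[i])
--         if max_so_far == i:
--             partions += 1
--       return partions
-- ===== SOURCE B (Python) =====
-- def maxPartition(n, arr):
--     # Build the running-maximum table (seeded with 0) first, then count
--     # positions i where the running max over arr[0..i] equals i.
--     prefix = [0]
--     for x in arr:
--         prefix.append(max(prefix[-1], x))
--     return sum(1 for i in range(n) if prefix[i + 1] == i)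
-- ===== Notes on version B (the rewrite author's own statement) =====
-- stated objective: idiomatic
-- what changed: B separates the fused loop into two phases: it first builds the 0-seeded running-maximum prefix table in one pass over arr, then counts with a sum-over-generator the indices i in range(n) with prefix[i+1] == i.
import Mathlib
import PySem

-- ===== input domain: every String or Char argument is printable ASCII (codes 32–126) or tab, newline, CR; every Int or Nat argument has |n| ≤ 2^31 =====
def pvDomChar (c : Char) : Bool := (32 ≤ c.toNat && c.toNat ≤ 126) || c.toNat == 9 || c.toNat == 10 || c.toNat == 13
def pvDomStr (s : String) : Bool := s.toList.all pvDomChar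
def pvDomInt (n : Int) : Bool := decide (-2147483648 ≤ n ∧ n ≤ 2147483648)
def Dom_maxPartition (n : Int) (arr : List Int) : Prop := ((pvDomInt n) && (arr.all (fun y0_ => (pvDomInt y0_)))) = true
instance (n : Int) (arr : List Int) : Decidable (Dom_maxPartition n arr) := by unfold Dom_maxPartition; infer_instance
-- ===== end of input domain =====

-- B builds the 0-seeded running-maximum prefix table in one pass, then counts
-- indices i < n with prefix[i+1] == i in a second pass (idiomatic decomposition).


-- ===== PORT A =====
-- for i in range(n): max_so_far = max(max_so_far, arr[i]); if max_so_far == i: partions += 1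
-- arr[i] is in range under Pre_ (0 ≤ i < n ≤ len arr), so pyGetD with default 0 is exact there.
def maxPartition (n : Int) (arr : List Int) : Int :=
  ((PySem.List.pyRange 0 n 1).foldl
    (fun (st : Int × Int) i =>
      let m := max st.1 (PySem.List.pyGetD arr i 0)
      (m, if m = i then st.2 + 1 else st.2)) (0, 0)).2

-- ===== PORT B =====
-- prefix = [0]; for x in arr: prefix.append(max(prefix[-1], x)); then count over range(n).
def maxPartition_alt (n : Int) (arr : List Int) : Int :=
  let pre := arr.foldl (fun (acc : List Int) x =>
    acc ++ [max (PySem.List.pyGetD acc (-1) 0) x]) [0]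
  (PySem.List.pyRange 0 n 1).foldl
    (fun c i => if PySem.List.pyGetD pre (i + 1) 0 = i then c + 1 else c) 0

-- ===== PRECONDITION & SPEC =====
-- A indexes arr[i] for i in range(n): it raises IndexError exactly when n > len(arr).
def Pre_maxPartition (n : Int) (arr : List Int) : Prop := n ≤ arr.length
instance (n : Int) (arr : List Int) : Decidable (Pre_maxPartition n arr) := by unfold Pre_maxPartition; infer_instance
def pvWitness_maxPartition : Int × List Int := (3, [0, 0, 2, 5])

def Spec_maxPartition (n : Int) (arr : List Int) (out : Int) : Prop := out = maxPartition_alt n arr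
instance (n : Int) (arr : List Int) (out : Int) : Decidable (Spec_maxPartition n arr out) := by unfold Spec_maxPartition; infer_instance

-- ===== CLAIM (what is proved, stated in full; the proofs are below) =====
def Claim_equal_maxPartition : Prop := ∀ (n : Int) (arr : List Int), Dom_maxPartition n arr → Pre_maxPartition n arr → Spec_maxPartition n arr (maxPartition n arr)

-- ===== LEMMAS AND PROOFS =====

-- running maximum of the first k elements, seeded with 0
def pvRunMax (arr : List Int) (k : Nat) : Int := (arr.take k).foldl max 0

theorem pvRunMax_succ (arr : List Int) (k : Nat) (hk : k < arr.length) :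
    pvRunMax arr (k + 1) = max (pvRunMax arr k) arr[k] := by
  unfold pvRunMax
  conv_lhs => rw [← List.take_concat_get hk]
  rw [List.concat_eq_append, List.foldl_append]
  simp

-- B's prefix table equals the list of running maxima, seeded with the 0
theorem pvPrefix_eq (arr : List Int) :
    arr.foldl (fun (acc : List Int) x =>
      acc ++ [max (PySem.List.pyGetD acc (-1) 0) x]) [0]
    = (List.range (arr.length + 1)).map (pvRunMax arr) := by
  -- generalized invariant: fold from the table of the first j maxima
  suffices h : ∀ (t : List Int) (j : Nat), j ≤ arr.length →
      (arr.drop j).foldl (fun (acc : List Int) x =>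
        acc ++ [max (PySem.List.pyGetD acc (-1) 0) x])
        ((List.range (j + 1)).map (pvRunMax arr))
      = (List.range (arr.length + 1)).map (pvRunMax arr) by
    have h0 := h arr 0 (Nat.zero_le _)
    simpa [pvRunMax] using h0
  intro t j hj
  clear t
  induction hle : arr.length - j generalizing j with
  | zero =>
    have : j = arr.length := by omega
    subst this
    simp
  | succ k ih =>
    have hlt : j < arr.length := by omega
    rw [List.drop_eq_getElem_cons hlt]
    simp only [List.foldl_cons]
    have hlast : PySem.List.pyGetD ((List.range (j + 1)).map (pvRunMax arr)) (-1) 0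
        = pvRunMax arr j := by
      have hne : (List.range (j + 1)).map (pvRunMax arr) ≠ [] := by simp
      rw [PySem.List.pyGetD_neg_one _ _ hne]
      rw [List.getLast_eq_getElem]
      simp
    rw [hlast]
    have hstep : (List.range (j + 1)).map (pvRunMax arr) ++ [max (pvRunMax arr j) arr[j]]
        = (List.range (j + 1 + 1)).map (pvRunMax arr) := by
      rw [List.range_succ, List.map_append, List.range_succ, List.map_append]
      simp [pvRunMax_succ arr j hlt, List.range_succ, List.append_assoc]
    rw [hstep]
    exact ih (j + 1) (by omega) (by omega)

theorem pvPrefix_get (arr : List Int) (k : Nat) (hk : k ≤ arr.length) :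
    PySem.List.pyGetD
      (arr.foldl (fun (acc : List Int) x =>
        acc ++ [max (PySem.List.pyGetD acc (-1) 0) x]) [0]) (k : Int) 0
    = pvRunMax arr k := by
  rw [pvPrefix_eq]
  rw [PySem.List.pyGetD_natCast]
  rw [List.getD_eq_getElem?_getD, List.getElem?_map,
      List.getElem?_range (by omega : k < arr.length + 1)]
  rfl

-- the main loop invariant: after k iterations A's state is (running max, B's count)
theorem pvLoop_eq (arr : List Int) (k : Nat) (hk : k ≤ arr.length) :
    (PySem.List.pyRange 0 (k : Int) 1).foldl
      (fun (st : Int × Int) i =>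
        let m := max st.1 (PySem.List.pyGetD arr i 0)
        (m, if m = i then st.2 + 1 else st.2)) (0, 0)
    = (pvRunMax arr k,
       (PySem.List.pyRange 0 (k : Int) 1).foldl
         (fun c i => if PySem.List.pyGetD
             (arr.foldl (fun (acc : List Int) x =>
               acc ++ [max (PySem.List.pyGetD acc (-1) 0) x]) [0]) (i + 1) 0 = i
           then c + 1 else c) 0) := by
  induction k with
  | zero => simp [PySem.List.pyRange_one_eq_nil, pvRunMax]
  | succ k ih =>
    have hk' : k ≤ arr.length := by omega
    have hcast : ((k + 1 : Nat) : Int) = (k : Int) + 1 := by push_cast; ring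
    rw [hcast, PySem.List.pyRange_one_succ_right (by positivity), List.foldl_append,
        List.foldl_append, ih hk']
    simp only [List.foldl_cons, List.foldl_nil]
    have hget : PySem.List.pyGetD arr (k : Int) 0 = arr[k]'(by omega) := by
      rw [PySem.List.pyGetD_natCast, List.getD_eq_getElem?_getD,
          List.getElem?_eq_getElem (by omega : k < arr.length)]
      rfl
    have hpre : PySem.List.pyGetD
        (arr.foldl (fun (acc : List Int) x =>
          acc ++ [max (PySem.List.pyGetD acc (-1) 0) x]) [0]) ((k : Int) + 1) 0
        = pvRunMax arr (k + 1) := by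
      have := pvPrefix_get arr (k + 1) (by omega)
      rwa [hcast] at this
    rw [hget, hpre, pvRunMax_succ arr k (by omega)]

-- ===== VERDICT (by name: the statement is the Claim_ definition above) =====
theorem maxPartition_spec : Claim_equal_maxPartition := by
  intro n arr _ hpre
  unfold Spec_maxPartition maxPartition maxPartition_alt
  by_cases hn : n < 0
  · rw [PySem.List.pyRange_one_eq_nil (by omega)]
    simp
  · rw [Int.not_lt] at hn
    obtain ⟨k, rfl⟩ : ∃ k : Nat, n = (k : Int) := ⟨n.toNat, (Int.toNat_of_nonneg hn).symm⟩
    have hk : k ≤ arr.length := by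
      unfold Pre_maxPartition at hpre; exact_mod_cast hpre
    rw [pvLoop_eq arr k hk]
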